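-- pv_equiv track=rewrite | github.com/XiLab-Robotics/Physics-Informed-Neural-Networks | scripts/tooling/video_guides/extract_video_guide_knowledge.py | choose_best_lm_studio_model
-- ===== SOURCE A (Python) =====
-- def choose_best_lm_studio_model(
--     requested_model_name: str,
--     available_model_name_list: list[str],
-- ) -> tuple[str, str]:
--
--     """ Choose Best LM Studio Model """
--
--     normalized_requested_model_name = requested_model_name.strip()
--     if not available_model_name_list:
--         return normalized_requested_model_name, "unverified"
--
--     if normalized_requested_model_name in available_model_name_list:
--         return normalized_requested_model_name, "exact"
--
--     generative_model_name_list = [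
--         model_name
--         for model_name in available_model_name_list
--         if "embedding" not in model_name.lower()
--     ]
--     if not generative_model_name_list:
--         return normalized_requested_model_name, "unverified"
--
--     requested_token_list = [
--         token
--         for token in normalized_requested_model_name.lower().replace("/", " ").replace("-", " ").split()
--         if token
--     ]
--     for available_model_name in generative_model_name_list:
--         available_model_lower = available_model_name.lower()
--         if any(requested_token in available_model_lower for requested_token in requested_token_list):
--             return available_model_name, "fallback-family"
--
--     return generative_model_name_list[0], "fallback-first-generative"
-- ===== SOURCE B (Python) =====
-- def choose_best_lm_studio_model(
--     requested_model_name: str,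
--     available_model_name_list: list[str],
-- ) -> tuple[str, str]:
--     """Token-major search: for each requested token find its earliest generative
--     match, then answer with the overall earliest one (argmin over list position)."""
--     normalized = requested_model_name.strip()
--     if not available_model_name_list:
--         return normalized, "unverified"
--     if normalized in available_model_name_list:
--         return normalized, "exact"
--     gens = [
--         (position, model_name, model_name.lower())
--         for position, model_name in enumerate(available_model_name_list)
--         if "embedding" not in model_name.lower()
--     ]
--     if not gens:
--         return normalized, "unverified"
--     tokens = [t for t in normalized.lower().replace("/", " ").replace("-", " ").split() if t]
--     best = None  # (position, model) of the earliest family match found so far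
--     for token in tokens:
--         hit = next(((position, model) for position, model, low in gens if token in low), None)
--         if hit is not None and (best is None or hit[0] < best[0]):
--             best = hit
--     if best is None:
--         return gens[0][1], "fallback-first-generative"
--     return best[1], "fallback-family"
-- ===== Notes on version B (the rewrite author's own statement) =====
-- stated objective: alternative
-- what changed: B inverts A's traversal: instead of scanning models and testing every token against each (returning the first matching model), B scans tokens, finds each token's earliest generative match with next() over precomputed (position, model, lower) triples, and keeps the argmin by list position; correctness rests on the proved fact that on a position-sorted candidate list the min over per-token first matches equals the model-major first match.
import Mathlib
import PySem

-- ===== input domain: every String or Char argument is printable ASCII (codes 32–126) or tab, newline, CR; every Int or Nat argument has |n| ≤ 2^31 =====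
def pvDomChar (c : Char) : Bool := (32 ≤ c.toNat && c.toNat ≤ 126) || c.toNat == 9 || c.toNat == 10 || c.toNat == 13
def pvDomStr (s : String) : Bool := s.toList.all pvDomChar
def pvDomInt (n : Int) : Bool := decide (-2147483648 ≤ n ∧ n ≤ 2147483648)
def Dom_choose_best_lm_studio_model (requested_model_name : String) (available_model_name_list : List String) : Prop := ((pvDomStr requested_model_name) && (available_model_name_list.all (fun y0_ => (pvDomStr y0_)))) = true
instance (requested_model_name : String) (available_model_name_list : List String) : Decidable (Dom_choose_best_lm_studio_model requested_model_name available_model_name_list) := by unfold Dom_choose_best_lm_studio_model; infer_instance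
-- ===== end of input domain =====

-- B replaces A's model-major scan (first model containing any requested token) by a
-- token-major argmin: each token's earliest generative match, then the overall earliest
-- by list position (objective: alternative; same result, proved via the sortedness of positions).

-- ===== PORT A =====
-- the requested-token list (identical expression in both Python sources)
def pvTokens (normalized : String) : List String :=
  (PySem.Str.split₀ (PySem.Str.replace (PySem.Str.replace (PySem.Str.lower normalized) "/" " ") "-" " ")).filter (fun t => t ≠ "")

-- A's final for-loop over the generative list (returns none when it falls through)
def pvSearchA (tokens : List String) : List String → Option (String × String)
  | [] => none
  | m :: ms =>
    let low := PySem.Str.lower m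
    if tokens.any (fun t => PySem.Str.isIn t low) then some (m, "fallback-family")
    else pvSearchA tokens ms

def choose_best_lm_studio_model (requested_model_name : String) (available_model_name_list : List String) : String × String :=
  let normalized := PySem.Str.strip requested_model_name
  if available_model_name_list = [] then (normalized, "unverified")
  else if available_model_name_list.contains normalized then (normalized, "exact")
  else
    let generative := available_model_name_list.filter
      (fun m => !(PySem.Str.isIn "embedding" (PySem.Str.lower m)))
    if generative = [] then (normalized, "unverified")
    else
      let tokens := pvTokens normalized
      match pvSearchA tokens generative with
      | some r => r
      | none => (generative.headD "", "fallback-first-generative")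

-- ===== PORT B =====
-- B's indexed generative triples (position, model, lowered model)
def pvGens (xs : List String) : List (Int × String × String) :=
  ((PySem.List.enumerate xs).filter
      (fun p => !(PySem.Str.isIn "embedding" (PySem.Str.lower p.2)))).map
    (fun p => (p.1, p.2, PySem.Str.lower p.2))

-- B's for-loop over the tokens: best = earliest (position, model) family match so far
def pvTokenLoop (gens : List (Int × String × String)) :
    List String → Option (Int × String) → Option (Int × String)
  | [], best => best
  | t :: ts, best =>
    let hit := (gens.find? (fun g => PySem.Str.isIn t g.2.2)).map (fun g => (g.1, g.2.1))
    let best' :=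
      match hit, best with
      | none, b => b
      | some h, none => some h
      | some h, some b => if h.1 < b.1 then some h else some b
    pvTokenLoop gens ts best'

def choose_best_lm_studio_model_alt (requested_model_name : String) (available_model_name_list : List String) : String × String :=
  let normalized := PySem.Str.strip requested_model_name
  if available_model_name_list = [] then (normalized, "unverified")
  else if available_model_name_list.contains normalized then (normalized, "exact")
  else
    let gens := pvGens available_model_name_list
    if gens = [] then (normalized, "unverified")
    else
      match pvTokenLoop gens (pvTokens normalized) none with
      | none => ((gens.headD (0, "", "")).2.1, "fallback-first-generative")
      | some b => (b.2, "fallback-family")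

-- ===== PRECONDITION & SPEC =====
def Spec_choose_best_lm_studio_model (requested_model_name : String) (available_model_name_list : List String) (out : String × String) : Prop := out = choose_best_lm_studio_model_alt requested_model_name available_model_name_list
instance (requested_model_name : String) (available_model_name_list : List String) (out : String × String) : Decidable (Spec_choose_best_lm_studio_model requested_model_name available_model_name_list out) := by unfold Spec_choose_best_lm_studio_model; infer_instance

-- ===== CLAIM (what is proved, stated in full; the proofs are below) =====
def Claim_equal_choose_best_lm_studio_model : Prop := ∀ (requested_model_name : String) (available_model_name_list : List String), Dom_choose_best_lm_studio_model requested_model_name available_model_name_list → Spec_choose_best_lm_studio_model requested_model_name available_model_name_list (choose_best_lm_studio_model requested_model_name available_model_name_list)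

-- ===== LEMMAS AND PROOFS =====

-- proof-side abstraction of B's token loop: only the per-token hit matters
def pvStep : Option (Int × String) → Option (Int × String) → Option (Int × String)
  | none, b => b
  | some h, none => some h
  | some h, some b => if h.1 < b.1 then some h else some b

def pvMinLoop (hit : String → Option (Int × String)) :
    List String → Option (Int × String) → Option (Int × String)
  | [], best => best
  | t :: ts, best => pvMinLoop hit ts (pvStep (hit t) best)

theorem pvTokenLoop_eq_minLoop (gens : List (Int × String × String)) (ts : List String)
    (best : Option (Int × String)) :
    pvTokenLoop gens ts best =
      pvMinLoop (fun t => (gens.find? (fun g => PySem.Str.isIn t g.2.2)).map (fun g => (g.1, g.2.1)))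
        ts best := by
  induction ts generalizing best with
  | nil => rfl
  | cons t ts ih =>
    show pvTokenLoop gens ts _ = pvMinLoop _ ts _
    rw [ih]
    congr 1

theorem pvMinLoop_congr (h1 h2 : String → Option (Int × String)) (ts : List String)
    (best : Option (Int × String)) (hc : ∀ t ∈ ts, h1 t = h2 t) :
    pvMinLoop h1 ts best = pvMinLoop h2 ts best := by
  induction ts generalizing best with
  | nil => rfl
  | cons t ts ih =>
    simp only [pvMinLoop, hc t (List.mem_cons_self ..)]
    exact ih _ (fun t' ht' => hc t' (List.mem_cons_of_mem _ ht'))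

theorem pvMinLoop_none_hits (hit : String → Option (Int × String)) (ts : List String)
    (best : Option (Int × String)) (h : ∀ t ∈ ts, hit t = none) :
    pvMinLoop hit ts best = best := by
  induction ts generalizing best with
  | nil => rfl
  | cons t ts ih =>
    simp only [pvMinLoop, h t (List.mem_cons_self ..)]
    have : pvStep none best = best := by cases best <;> rfl
    rw [this]
    exact ih _ (fun t' ht' => h t' (List.mem_cons_of_mem _ ht'))

-- cons-case workhorse: if some token hits the head a and every other hit lies strictly later
-- in the list, the loop ends at a
theorem pvMinLoop_head (q : String → Int × String → Bool) (a : Int × String)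
    (l : List (Int × String)) (hl : ∀ x ∈ l, a.1 < x.1) :
    ∀ (ts : List String) (best : Option (Int × String)),
      (best = some a ∨ ((best = none ∨ ∀ b, best = some b → a.1 < b.1) ∧ ∃ t ∈ ts, q t a = true)) →
      pvMinLoop (fun t => if q t a = true then some a else l.find? (q t)) ts best = some a := by
  intro ts
  induction ts with
  | nil =>
    intro best hb
    rcases hb with hb | ⟨_, t, ht, _⟩
    · simpa [pvMinLoop] using hb
    · exact absurd ht (List.not_mem_nil)
  | cons t ts ih =>
    intro best hb
    simp only [pvMinLoop]
    by_cases hq : q t a = true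
    · -- this token hits the head: best' becomes (or stays) a
      rw [if_pos hq]
      have hbest' : pvStep (some a) best = some a := by
        rcases hb with hb | ⟨hb, _⟩
        · subst hb; simp [pvStep]
        · rcases hb with hb | hb
          · subst hb; rfl
          · cases best with
            | none => rfl
            | some b => have hab := hb b rfl; simp [pvStep, hab]
      rw [hbest']
      exact ih _ (Or.inl rfl)
    · -- this token misses the head: any hit comes from l, hence lies strictly after a
      rw [if_neg hq]
      rcases hb with hb | ⟨hbb, t', ht', hqt'⟩
      · subst hb
        cases hf : l.find? (q t) with
        | none => exact ih _ (Or.inl rfl)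
        | some h =>
          have hah : a.1 < h.1 := hl h (List.mem_of_find?_eq_some hf)
          have : pvStep (some h) (some a) = some a := by
            simp only [pvStep, if_neg (by omega : ¬ h.1 < a.1)]
          rw [this]
          exact ih _ (Or.inl rfl)
      · have ht'' : t' ∈ ts := by
          rcases List.mem_cons.mp ht' with rfl | h
          · exact absurd hqt' hq
          · exact h
        cases hf : l.find? (q t) with
        | none =>
          have : pvStep none best = best := by cases best <;> rfl
          rw [this]
          exact ih _ (Or.inr ⟨hbb, t', ht'', hqt'⟩)
        | some h =>
          have hah : a.1 < h.1 := hl h (List.mem_of_find?_eq_some hf)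
          cases best with
          | none =>
            refine ih _ (Or.inr ⟨Or.inr ?_, t', ht'', hqt'⟩)
            rintro b hb'
            simp only [pvStep] at hb'
            injection hb' with e; subst e; exact hah
          | some b =>
            have hab : a.1 < b.1 := by
              rcases hbb with h' | h'
              · exact absurd h' (by simp)
              · exact h' b rfl
            refine ih _ (Or.inr ⟨Or.inr ?_, t', ht'', hqt'⟩)
            rintro b' hb'
            simp only [pvStep] at hb'
            split at hb' <;> (injection hb' with e; subst e; omega)

-- core: on a position-sorted list, the min over per-token first matches is the
-- model-major first match
theorem pvMinLoop_core (q : String → Int × String → Bool) (l : List (Int × String))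
    (hl : l.Pairwise (fun a b => a.1 < b.1)) (ts : List String) :
    pvMinLoop (fun t => l.find? (q t)) ts none =
      l.find? (fun pr => ts.any (fun t => q t pr)) := by
  induction l with
  | nil => exact pvMinLoop_none_hits _ ts none (fun t _ => rfl)
  | cons a l ih =>
    have ha : ∀ x ∈ l, a.1 < x.1 := (List.pairwise_cons.mp hl).1
    have hls : l.Pairwise (fun a b => a.1 < b.1) := (List.pairwise_cons.mp hl).2
    have hfind : ∀ t, (a :: l).find? (q t) = if q t a = true then some a else l.find? (q t) := by
      intro t; by_cases h : q t a = true <;> simp [List.find?, h]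
    rw [pvMinLoop_congr _ _ ts none (fun t _ => hfind t)]
    by_cases hany : ∃ t ∈ ts, q t a = true
    · rcases hany with ⟨t, ht, hq⟩
      rw [pvMinLoop_head q a l ha ts none (Or.inr ⟨Or.inl rfl, t, ht, hq⟩)]
      have h1 : ts.any (fun t => q t a) = true := List.any_eq_true.mpr ⟨t, ht, hq⟩
      simp only [List.find?, h1]
    · have hnone : ∀ t ∈ ts, q t a = false := by
        intro t ht
        by_contra h
        exact hany ⟨t, ht, by simpa using h⟩
      have h1 : ∀ t ∈ ts, (if q t a = true then some a else l.find? (q t)) = l.find? (q t) := by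
        intro t ht; simp [hnone t ht]
      rw [pvMinLoop_congr _ _ ts none h1, ih hls]
      have h2 : ts.any (fun t => q t a) = false := by
        simp only [List.any_eq_false]
        intro t ht; simp [hnone t ht]
      simp only [List.find?, h2]

-- A's loop is a find?
theorem pvSearchA_eq_find? (tokens : List String) (ys : List String) :
    pvSearchA tokens ys =
      (ys.find? (fun m => tokens.any (fun t => PySem.Str.isIn t (PySem.Str.lower m)))).map
        (fun m => (m, "fallback-family")) := by
  induction ys with
  | nil => rfl
  | cons m ms ih =>
    show (if tokens.any (fun t => PySem.Str.isIn t (PySem.Str.lower m)) = true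
          then some (m, "fallback-family") else pvSearchA tokens ms) = _
    by_cases h : tokens.any (fun t => PySem.Str.isIn t (PySem.Str.lower m)) = true
    · rw [if_pos h,
        show List.find? (fun m => tokens.any fun t => PySem.Str.isIn t (PySem.Str.lower m)) (m :: ms)
            = some m from List.find?_cons_of_pos h]
      rfl
    · rw [if_neg h,
        show List.find? (fun m => tokens.any fun t => PySem.Str.isIn t (PySem.Str.lower m)) (m :: ms)
            = List.find? (fun m => tokens.any fun t => PySem.Str.isIn t (PySem.Str.lower m)) ms
          from List.find?_cons_of_neg (by simpa using h)]
      exact ih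

theorem choose_eq (requested_model_name : String) (available_model_name_list : List String) :
    choose_best_lm_studio_model requested_model_name available_model_name_list =
      choose_best_lm_studio_model_alt requested_model_name available_model_name_list := by
  by_cases h0 : available_model_name_list = []
  · simp [choose_best_lm_studio_model, choose_best_lm_studio_model_alt, h0]
  · by_cases h1 : available_model_name_list.contains (PySem.Str.strip requested_model_name) = true
    · simp only [choose_best_lm_studio_model, choose_best_lm_studio_model_alt,
        if_neg h0, if_pos h1]
    · simp only [choose_best_lm_studio_model, choose_best_lm_studio_model_alt,
        if_neg h0, if_neg h1]
      set tokens := pvTokens (PySem.Str.strip requested_model_name) with htok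
      set p : String → Bool := fun m => !(PySem.Str.isIn "embedding" (PySem.Str.lower m)) with hp
      set f : Int × String → Int × String × String :=
        (fun pr => (pr.1, pr.2, PySem.Str.lower pr.2)) with hf
      set l : List (Int × String) :=
        (PySem.List.enumerate available_model_name_list).filter (fun pr => p pr.2) with hldef
      have hgens : pvGens available_model_name_list = l.map f := by
        rw [pvGens, hldef, hp, hf]
      have hgenerative : available_model_name_list.filter p = l.map (fun pr => pr.2) := by
        conv_lhs => rw [← PySem.List.map_snd_enumerate available_model_name_list 0]
        rw [List.filter_map]
        rfl
      have hlpw : l.Pairwise (fun a b => a.1 < b.1) :=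
        (PySem.List.pairwise_lt_enumerate available_model_name_list 0).sublist
          List.filter_sublist
      -- B's token loop equals the model-major find? on l
      have hB : pvTokenLoop (l.map f) tokens none =
          l.find? (fun pr => tokens.any (fun t => PySem.Str.isIn t (PySem.Str.lower pr.2))) := by
        rw [pvTokenLoop_eq_minLoop]
        have hhit : ∀ t,
            ((l.map f).find? (fun g => PySem.Str.isIn t g.2.2)).map (fun g => (g.1, g.2.1)) =
              l.find? (fun pr => PySem.Str.isIn t (PySem.Str.lower pr.2)) := by
          intro t
          rw [List.find?_map, Option.map_map]
          have e1 : ((fun (g : Int × String × String) => (g.1, g.2.1)) ∘ f) = id := rfl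
          have e2 : ((fun (g : Int × String × String) => PySem.Str.isIn t g.2.2) ∘ f) =
              (fun pr : Int × String => PySem.Str.isIn t (PySem.Str.lower pr.2)) := rfl
          rw [e1, e2, Option.map_id]
          rfl
        rw [pvMinLoop_congr _ _ tokens none (fun t _ => hhit t)]
        exact pvMinLoop_core (fun t pr => PySem.Str.isIn t (PySem.Str.lower pr.2)) l hlpw tokens
      clear_value tokens p f l
      rw [hgenerative]
      rw [hgens]
      rw [hB]
      rw [pvSearchA_eq_find?]
      rw [List.find?_map]
      have hcomp : ((fun m => tokens.any (fun t => PySem.Str.isIn t (PySem.Str.lower m))) ∘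
            (fun pr : Int × String => pr.2)) =
          (fun pr : Int × String => tokens.any (fun t => PySem.Str.isIn t (PySem.Str.lower pr.2))) := by funext pr; rfl
      rw [hcomp]
      cases l with
      | nil => simp
      | cons pr l' =>
        cases hfin : List.find?
            (fun pr : Int × String => tokens.any (fun t => PySem.Str.isIn t (PySem.Str.lower pr.2)))
            (pr :: l') with
        | some x => simp
        | none => simp [hf]

-- ===== VERDICT (by name: the statement is the Claim_ definition above) =====
theorem choose_best_lm_studio_model_spec : Claim_equal_choose_best_lm_studio_model := by
  intro r xs _
  exact choose_eq r xs
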